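-- pv_equiv track=rewrite | github.com/Kris465/MemoryBox | block6/task105.py | cut_squares
-- ===== SOURCE A (Python) =====
-- def cut_squares(a, b):
--     squares = []
--     while a > 0 and b > 0:
--         if a < b:
--             size = a
--             count = b // a
--             b -= size * count
--         else:
--             size = b
--             count = a // b
--             a -= size * count
--
--         squares.append((size, count))
--     return squares
-- ===== SOURCE B (Python) =====
-- def cut_squares(a, b):
--     if a <= 0 or b <= 0:
--         return []
--     if a < b:
--         return [(a, b // a)] + cut_squares(a, b % a)
--     return [(b, a // b)] + cut_squares(a % b, b)
-- ===== Notes on version B (the rewrite author's own statement) =====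
-- stated objective: simpler
-- what changed: Replaces the while-loop with append-accumulator by a direct Euclidean recursion that prepends each (size, count) pair and uses the modulus instead of 'b -= size*count'.
import Mathlib
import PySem

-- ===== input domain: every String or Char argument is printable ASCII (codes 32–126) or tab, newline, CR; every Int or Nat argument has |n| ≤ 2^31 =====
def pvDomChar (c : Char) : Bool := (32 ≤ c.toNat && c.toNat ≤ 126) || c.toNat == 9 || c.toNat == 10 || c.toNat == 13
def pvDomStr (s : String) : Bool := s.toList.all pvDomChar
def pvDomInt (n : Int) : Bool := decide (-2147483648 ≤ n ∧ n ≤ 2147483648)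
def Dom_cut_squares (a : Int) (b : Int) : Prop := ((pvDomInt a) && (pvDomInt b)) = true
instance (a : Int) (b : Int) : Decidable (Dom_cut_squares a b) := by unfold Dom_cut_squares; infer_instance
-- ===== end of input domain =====

-- B replaces A's while-loop with an append accumulator by a direct Euclidean recursion
-- that prepends each (size, count) pair and uses the modulus; objective: simpler.

-- ===== PORT A =====
-- the while-loop of A as a tail recursion over its state (a, b, squares)
def cut_squares_loop (a : Int) (b : Int) (squares : List (Int × Int)) : List (Int × Int) :=
  if h : a > 0 ∧ b > 0 then
    if a < b then
      -- size = a; count = b // a; b -= size * count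
      cut_squares_loop a (b - a * PySem.Int.floordiv b a) (squares ++ [(a, PySem.Int.floordiv b a)])
    else
      -- size = b; count = a // b; a -= size * count
      cut_squares_loop (a - b * PySem.Int.floordiv a b) b (squares ++ [(b, PySem.Int.floordiv a b)])
  else squares
termination_by (a.toNat + b.toNat)
decreasing_by
  · have hfd : PySem.Int.floordiv b a = b / a := PySem.Int.floordiv_eq_ediv_of_pos h.1
    have h1 : b % a = b - a * (b / a) := Int.emod_def b a
    have h2 : 0 ≤ b % a := Int.emod_nonneg b (by omega)
    have h3 : b % a < a := Int.emod_lt_of_pos b h.1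
    rw [hfd]; omega
  · have hfd : PySem.Int.floordiv a b = a / b := PySem.Int.floordiv_eq_ediv_of_pos h.2
    have h1 : a % b = a - b * (a / b) := Int.emod_def a b
    have h2 : 0 ≤ a % b := Int.emod_nonneg a (by omega)
    have h3 : a % b < b := Int.emod_lt_of_pos a h.2
    rw [hfd]; omega

def cut_squares (a : Int) (b : Int) : List (Int × Int) :=
  cut_squares_loop a b []

-- ===== PORT B =====
def cut_squares_alt (a : Int) (b : Int) : List (Int × Int) :=
  if a ≤ 0 ∨ b ≤ 0 then []
  else if a < b then
    (a, PySem.Int.floordiv b a) :: cut_squares_alt a (PySem.Int.mod b a)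
  else
    (b, PySem.Int.floordiv a b) :: cut_squares_alt (PySem.Int.mod a b) b
termination_by (a.toNat + b.toNat)
decreasing_by
  · have hm : PySem.Int.mod b a = b % a := PySem.Int.mod_eq_emod_of_pos (by omega)
    have h2 : 0 ≤ b % a := Int.emod_nonneg b (by omega)
    have h3 : b % a < a := Int.emod_lt_of_pos b (by omega)
    rw [hm]; omega
  · have hm : PySem.Int.mod a b = a % b := PySem.Int.mod_eq_emod_of_pos (by omega)
    have h2 : 0 ≤ a % b := Int.emod_nonneg a (by omega)
    have h3 : a % b < b := Int.emod_lt_of_pos a (by omega)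
    rw [hm]; omega

-- ===== PRECONDITION & SPEC =====
def Spec_cut_squares (a : Int) (b : Int) (out : List (Int × Int)) : Prop := out = cut_squares_alt a b
instance (a : Int) (b : Int) (out : List (Int × Int)) : Decidable (Spec_cut_squares a b out) := by unfold Spec_cut_squares; infer_instance

-- ===== CLAIM (what is proved, stated in full; the proofs are below) =====
def Claim_equal_cut_squares : Prop := ∀ (a : Int) (b : Int), Dom_cut_squares a b → Spec_cut_squares a b (cut_squares a b)

-- ===== LEMMAS AND PROOFS =====
-- Python's 'b -= size * count' leaves exactly the floor-modulus.
theorem sub_mul_floordiv_eq_mod (a b : Int) :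
    b - a * PySem.Int.floordiv b a = PySem.Int.mod b a := by
  have h := PySem.Int.floordiv_mul_add_mod b a
  linarith [h]

theorem cut_squares_loop_eq (a b : Int) (acc : List (Int × Int)) :
    cut_squares_loop a b acc = acc ++ cut_squares_alt a b := by
  induction a, b, acc using cut_squares_loop.induct with
  | case1 a b acc h hlt ih =>
    rw [cut_squares_loop, cut_squares_alt]
    have hne : ¬ (a ≤ 0 ∨ b ≤ 0) := by omega
    simp only [dif_pos h, if_pos hlt, ih, if_neg hne]
    rw [sub_mul_floordiv_eq_mod]
    simp
  | case2 a b acc h hge ih =>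
    rw [cut_squares_loop, cut_squares_alt]
    have hne : ¬ (a ≤ 0 ∨ b ≤ 0) := by omega
    simp only [dif_pos h, if_neg hge, ih, if_neg hne]
    rw [sub_mul_floordiv_eq_mod]
    simp
  | case3 a b acc h =>
    rw [cut_squares_loop, cut_squares_alt]
    have hle : a ≤ 0 ∨ b ≤ 0 := by omega
    simp [h, hle]

-- ===== VERDICT (by name: the statement is the Claim_ definition above) =====
theorem cut_squares_spec : Claim_equal_cut_squares := by
  intro a b _
  unfold Spec_cut_squares cut_squares
  simpa using cut_squares_loop_eq a b []
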